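-- pv_equiv track=rewrite | github.com/HWaymentSteele/AFCluster-2 | src/utils/msa.py | expand_sequences
-- ===== SOURCE A (Python) =====
-- from typing import List, Tuple
--
-- def expand_sequences(parsed_seqs: List[List[Tuple[str, str]]]) -> List[str]:
--     """
--     Given parsed sequences (list of parse_sequence outputs, one per sequence),
--     compute per-aligned-position maximum insertion length, and expand each sequence
--     into the full column-wise representation.
--
--     Returns list of expanded sequences (strings). Inserted letters are kept (lowercase).
--     For sequences lacking insertion at a given slot, '-' are inserted to pad to the max length.
--     """
--     # sanity: all sequences must have the same number of aligned positions
--     lengths = [len(p) for p in parsed_seqs]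
--     if len(set(lengths)) != 1:
--         raise ValueError(f"Parsed sequences have differing numbers of aligned positions: {lengths}")
--
--     npos = lengths[0]
--     # compute max insertion length after each aligned position
--     max_ins = [0] * npos
--     for p in parsed_seqs:
--         for i, (_, ins) in enumerate(p):
--             if len(ins) > max_ins[i]:
--                 max_ins[i] = len(ins)
--
--     # build expanded sequences
--     expanded = []
--     for p in parsed_seqs:
--         out_chars = []
--         for i, (aligned_char, ins) in enumerate(p):
--             # put the aligned char (keep '-' or uppercase as-is)
--             out_chars.append(aligned_char)
--             # append insertion letters (if any), then pad with '-' to max_ins[i]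
--             if ins:
--                 out_chars.extend(list(ins.upper()))
--                 pad = max_ins[i] - len(ins)
--                 if pad > 0:
--                     out_chars.extend(['-'] * pad)
--             else:
--                 # no insertion in this seq at this position -> add all gaps
--                 if max_ins[i] > 0:
--                     out_chars.extend(['-'] * max_ins[i])
--         expanded.append(''.join(out_chars))
--     return expanded
-- ===== SOURCE B (Python) =====
-- def expand_sequences(parsed_seqs):
--     """Column-wise single pass: transpose with zip(*...), compute each column's
--     max insertion length and emit that column's cell for every sequence in the
--     same visit, instead of A's two global row-major passes."""
--     lengths = [len(p) for p in parsed_seqs]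
--     if len(set(lengths)) != 1:
--         raise ValueError(f"Parsed sequences have differing numbers of aligned positions: {lengths}")
--     bufs = [[] for _ in parsed_seqs]
--     for col in zip(*parsed_seqs):
--         m = max(len(ins) for _, ins in col)
--         for buf, (ch, ins) in zip(bufs, col):
--             buf.append(ch + ins.upper() + '-' * (m - len(ins)))
--     return [''.join(b) for b in bufs]
-- ===== Notes on version B (the rewrite author's own statement) =====
-- stated objective: alternative
-- what changed: Replaces A's two global row-major passes (a max-insertion table built first, then every row expanded against it) with a single column-wise pass over zip(*parsed_seqs) that computes each column's max and emits that column's cell into every sequence's buffer in the same visit.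
import Mathlib
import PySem

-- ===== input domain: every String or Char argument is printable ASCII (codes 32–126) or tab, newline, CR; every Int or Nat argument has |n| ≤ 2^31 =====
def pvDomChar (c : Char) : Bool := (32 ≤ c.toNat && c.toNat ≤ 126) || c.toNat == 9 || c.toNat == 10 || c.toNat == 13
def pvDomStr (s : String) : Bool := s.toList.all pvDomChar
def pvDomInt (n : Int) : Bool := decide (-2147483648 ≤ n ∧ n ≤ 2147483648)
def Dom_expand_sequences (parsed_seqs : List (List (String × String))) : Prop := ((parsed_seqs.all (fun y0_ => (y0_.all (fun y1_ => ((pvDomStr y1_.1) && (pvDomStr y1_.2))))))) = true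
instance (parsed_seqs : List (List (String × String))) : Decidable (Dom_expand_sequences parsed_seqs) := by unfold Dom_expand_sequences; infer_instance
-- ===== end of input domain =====

-- B re-implements A column-wise: one pass over zip(*parsed_seqs), computing each column's max
-- insertion length and emitting that column's cell for every sequence in the same visit,
-- instead of A's two global row-major passes. Equal return value on all inputs where A returns.

-- ===== PORT A =====
-- body of A's first inner loop: 'if len(ins) > max_ins[i]: max_ins[i] = len(ins)'
def stepA (mi : List Int) (ip : Int × (String × String)) : List Int :=
  if PySem.Str.len ip.2.2 > mi.getD ip.1.toNat 0 then
    mi.set ip.1.toNat (PySem.Str.len ip.2.2)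
  else mi

-- body of A's second inner loop: append aligned char, insertion (uppercased), gap padding
def stepOutA (max_ins : List Int) (out : List Char) (ip : Int × (String × String)) : List Char :=
  let out := out ++ ip.2.1.toList
  if PySem.Str.len ip.2.2 ≠ 0 then
    let out := out ++ (PySem.Str.upper ip.2.2).toList
    let pad : Int := max_ins.getD ip.1.toNat 0 - PySem.Str.len ip.2.2
    if pad > 0 then out ++ PySem.List.pyRepeat ['-'] pad else out
  else
    if max_ins.getD ip.1.toNat 0 > 0 then
      out ++ PySem.List.pyRepeat ['-'] (max_ins.getD ip.1.toNat 0)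
    else out

def expand_sequences (parsed_seqs : List (List (String × String))) : List String :=
  let lengths := parsed_seqs.map List.length
  -- the ValueError branch (len(set(lengths)) != 1) is excluded by Pre_expand_sequences
  let npos := lengths.headD 0
  let max_ins := parsed_seqs.foldl (fun mi p => (PySem.List.enumerate p).foldl stepA mi)
    (List.replicate npos (0 : Int))
  parsed_seqs.foldl (fun expanded p =>
    expanded ++ [String.ofList ((PySem.List.enumerate p).foldl (stepOutA max_ins) [])]) []

-- ===== PORT B =====
-- zip(*seqs): columns until the shortest sequence is exhausted
def pyZipStar (seqs : List (List (String × String))) : List (List (String × String)) :=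
  if _h : seqs ≠ [] ∧ seqs.all (fun p => p ≠ []) then
    seqs.map (fun p => p.headD ("", "")) :: pyZipStar (seqs.map List.tail)
  else []
termination_by (seqs.headD []).length
decreasing_by
  obtain ⟨hne, hall⟩ := _h
  cases seqs with
  | nil => exact absurd rfl hne
  | cons q rest =>
    simp only [List.headD_cons]
    have hq : q ≠ [] := by have := List.all_eq_true.mp hall q (by simp); simpa using this
    cases q with
    | nil => exact absurd rfl hq
    | cons a as => simp

-- one output cell of B: aligned char + uppercased insertion + '-'-padding to the column max
def cellB (m : Int) (pr : String × String) : String :=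
  pr.1 ++ PySem.Str.upper pr.2 ++ String.ofList (PySem.List.pyRepeat ['-'] (m - PySem.Str.len pr.2))

def expand_sequences_alt (parsed_seqs : List (List (String × String))) : List String :=
  -- the ValueError branch (len(set(lengths)) != 1) is excluded by Pre_expand_sequences
  let bufs0 : List (List String) := parsed_seqs.map (fun _ => [])
  let bufs := (pyZipStar parsed_seqs).foldl (fun bufs col =>
      -- max(len(ins) for _, ins in col): col is nonempty here and lengths are ≥ 0,
      -- so the 0-seeded fold is exactly Python's max
      let m := col.foldl (fun m pr => max m (PySem.Str.len pr.2)) (0 : Int)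
      (bufs.zip col).map (fun bc => bc.1 ++ [cellB m bc.2]))
    bufs0
  bufs.map (fun b => PySem.Str.join "" b)
-- ===== PRECONDITION & SPEC =====
-- Pre_ excludes exactly the inputs where A (and B alike) raises ValueError:
-- the empty list and ragged inputs (rows of differing length).
def Pre_expand_sequences (parsed_seqs : List (List (String × String))) : Prop :=
  parsed_seqs ≠ [] ∧ ∀ q ∈ parsed_seqs, q.length = (parsed_seqs.headD []).length
instance (parsed_seqs : List (List (String × String))) : Decidable (Pre_expand_sequences parsed_seqs) := by unfold Pre_expand_sequences; infer_instance

def pvWitness_expand_sequences : (List (List (String × String))) :=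
  [[("A", "cg"), ("-", "")], [("C", ""), ("G", "t")]]

def Spec_expand_sequences (parsed_seqs : List (List (String × String))) (out : List String) : Prop := out = expand_sequences_alt parsed_seqs
instance (parsed_seqs : List (List (String × String))) (out : List String) : Decidable (Spec_expand_sequences parsed_seqs out) := by unfold Spec_expand_sequences; infer_instance

-- ===== CLAIM (what is proved, stated in full; the proofs are below) =====
def Claim_equal_expand_sequences : Prop := ∀ (parsed_seqs : List (List (String × String))), Dom_expand_sequences parsed_seqs → Pre_expand_sequences parsed_seqs → Spec_expand_sequences parsed_seqs (expand_sequences parsed_seqs)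

-- ===== LEMMAS AND PROOFS =====

-- default pair (Python never reads it inside the proved region)
def pvD : String × String := ("", "")

-- one cell of the expansion, as characters

-- column-i maximum insertion length over the rows
def colMaxF (ps : List (List (String × String))) (i : Nat) : Int :=
  ps.foldl (fun m p => max m (PySem.Str.len (p.getD i pvD).2)) 0

theorem innerA_getD (p : List (String × String)) (mi : List Int) (s : Nat)
    (hs : s + p.length ≤ mi.length) :
    (((PySem.List.enumerate p (s : Int)).foldl stepA mi).length = mi.length) ∧
    ∀ j : Nat, ((PySem.List.enumerate p (s : Int)).foldl stepA mi).getD j 0 =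
      if s ≤ j ∧ j < s + p.length then
        max (mi.getD j 0) (PySem.Str.len (p.getD (j - s) pvD).2)
      else mi.getD j 0 := by
  induction p generalizing mi s with
  | nil => simp [PySem.List.enumerate]
  | cons pr p ih =>
    rw [PySem.List.enumerate_cons, List.foldl_cons]
    have hs' : (s : Int) + 1 = ((s + 1 : Nat) : Int) := by push_cast; ring
    have hlen : (stepA mi ((s : Int), pr)).length = mi.length := by
      unfold stepA; split <;> simp
    have hrec := ih (stepA mi ((s : Int), pr)) (s + 1)
      (by rw [hlen]; simp only [List.length_cons] at hs; omega)
    rw [hs'] at *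
    refine ⟨by rw [hrec.1, hlen], ?_⟩
    intro j
    rw [hrec.2 j]
    have hslt : s < mi.length := by simp only [List.length_cons] at hs; omega
    have hstep : ∀ j : Nat, (stepA mi ((s : Int), pr)).getD j 0 =
        if j = s then max (mi.getD j 0) (PySem.Str.len pr.2) else mi.getD j 0 := by
      intro j
      unfold stepA
      simp only [Int.toNat_natCast]
      by_cases hgt : PySem.Str.len pr.2 > mi.getD s 0
      · rw [if_pos hgt]
        by_cases hj : j = s
        · subst hj
          simp [List.getD, hslt]
          rw [PySem.Str.len_eq, List.getD_eq_getElem mi 0 hslt, String.length_toList] at hgt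
          omega
        · simp [List.getD, Ne.symm hj, hj]
      · rw [if_neg hgt]
        by_cases hj : j = s
        · subst hj
          rw [if_pos rfl, max_eq_left (by omega : PySem.Str.len pr.2 ≤ mi.getD j 0)]
        · rw [if_neg hj]
    rw [hstep j]
    by_cases hj : j = s
    · subst hj
      have c1 : ¬ (j + 1 ≤ j ∧ j < j + 1 + p.length) := by omega
      rw [if_neg c1, if_pos rfl]
      have c2 : j ≤ j ∧ j < j + (pr :: p).length := by simp only [List.length_cons]; omega
      rw [if_pos c2, Nat.sub_self]
      simp
    · rw [if_neg hj]
      by_cases hin : s + 1 ≤ j ∧ j < s + 1 + p.length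
      · have h2 : s ≤ j ∧ j < s + (pr :: p).length := by simp only [List.length_cons]; omega
        rw [if_pos hin, if_pos h2]
        have hsub : j - s = (j - (s + 1)) + 1 := by omega
        rw [hsub]
        simp
      · have h2 : ¬ (s ≤ j ∧ j < s + (pr :: p).length) := by simp only [List.length_cons]; omega
        rw [if_neg hin, if_neg h2]

theorem rowsA_getD (ps : List (List (String × String))) (n : Nat) :
    ∀ (mi : List Int), (∀ p ∈ ps, p.length = n) → mi.length = n →
    ((ps.foldl (fun mi p => (PySem.List.enumerate p (0:Int)).foldl stepA mi) mi).length = n) ∧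
    ∀ j : Nat, j < n →
      (ps.foldl (fun mi p => (PySem.List.enumerate p (0:Int)).foldl stepA mi) mi).getD j 0 =
        ps.foldl (fun m p => max m (PySem.Str.len (p.getD j pvD).2)) (mi.getD j 0) := by
  induction ps with
  | nil => intro mi _ hm; exact ⟨hm, fun j _ => rfl⟩
  | cons p ps ih =>
    intro mi hn hm
    have hp : p.length = n := hn p (by simp)
    have h0 : ((0 : Nat) : Int) = (0 : Int) := rfl
    have hin := innerA_getD p mi 0 (by omega)
    rw [h0] at hin
    simp only [List.foldl_cons]
    have hrec := ih ((PySem.List.enumerate p (0:Int)).foldl stepA mi)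
      (fun q hq => hn q (by simp [hq])) (by rw [hin.1, hm])
    refine ⟨hrec.1, fun j hj => ?_⟩
    rw [hrec.2 j hj, hin.2 j]
    have : 0 ≤ j ∧ j < 0 + p.length := by omega
    rw [if_pos this]
    simp

def cellC (m : Int) (pr : String × String) : List Char :=
  pr.1.toList ++ (PySem.Str.upper pr.2).toList
    ++ List.replicate (m - PySem.Str.len pr.2).toNat '-'

theorem stepOut_collapse (mi : List Int) (out : List Char) (ip : Int × (String × String)) :
    stepOutA mi out ip = out ++ cellC (mi.getD ip.1.toNat 0) ip.2 := by
  obtain ⟨i, ac, ins⟩ := ip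
  simp only [stepOutA, cellC]
  by_cases hz : PySem.Str.len ins ≠ 0
  · rw [if_pos hz]
    by_cases hp : mi.getD i.toNat 0 - PySem.Str.len ins > 0
    · rw [if_pos hp]
      simp [PySem.List.pyRepeat_singleton]
    · rw [if_neg hp]
      have h0 : (mi.getD i.toNat 0 - PySem.Str.len ins).toNat = 0 := Int.toNat_of_nonpos (by omega)
      simp only [h0, List.replicate_zero, List.append_nil, List.append_assoc]
  · rw [if_neg hz]
    simp only [ne_eq, not_not, PySem.Str.len_eq, Nat.cast_eq_zero, List.length_eq_zero_iff] at hz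
    have hu : (PySem.Str.upper ins).toList = [] := by
      simp [PySem.Str.toList_upper, PySem.Chars.upper, hz]
    have hl : PySem.Str.len ins = 0 := by simp [PySem.Str.len_eq, hz]
    simp only [hl, sub_zero]
    by_cases hm : mi.getD i.toNat 0 > 0
    · rw [if_pos hm]
      simp [hu, PySem.List.pyRepeat_singleton]
    · rw [if_neg hm]
      have h0 : (mi.getD i.toNat 0).toNat = 0 := Int.toNat_of_nonpos (by omega)
      simp only [h0, hu, List.replicate_zero, List.append_nil]

theorem outA_fold (mi : List Int) (p : List (String × String)) :
    ∀ (s : Nat) (acc : List Char),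
    (PySem.List.enumerate p (s : Int)).foldl (stepOutA mi) acc =
    acc ++ ((List.range p.length).map (fun t => cellC (mi.getD (s + t) 0) (p.getD t pvD))).flatten := by
  induction p with
  | nil => intro s acc; simp [PySem.List.enumerate]
  | cons pr p ih =>
    intro s acc
    rw [PySem.List.enumerate_cons, List.foldl_cons]
    have hs' : (s : Int) + 1 = ((s + 1 : Nat) : Int) := by push_cast; ring
    rw [hs', ih (s + 1), stepOut_collapse mi acc ((s : Int), pr)]
    simp only [Int.toNat_natCast, List.length_cons, List.range_succ_eq_map, List.map_cons,
      List.map_map, List.flatten_cons, List.getD_cons_zero, Nat.add_zero, List.append_assoc]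
    congr 2
    congr 1
    apply List.map_congr_left
    intro t _
    have he : s + 1 + t = s + (t + 1) := by omega
    simp [Function.comp, he]

-- canonical form of A under the precondition
theorem expandA_canon (ps : List (List (String × String))) (n : Nat)
    (hn : ∀ p ∈ ps, p.length = n)
    (hhead : ((ps.map List.length).headD 0) = n) :
    expand_sequences ps =
      ps.map (fun p => String.ofList
        (((List.range n).map (fun i => cellC (colMaxF ps i) (p.getD i pvD))).flatten)) := by
  have hrows := rowsA_getD ps n (List.replicate n 0) hn (by simp)
  unfold expand_sequences
  simp only [hhead]
  rw [PySem.List.foldl_append_singleton_eq_map]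
  simp only [List.nil_append]
  apply List.map_congr_left
  intro p hp
  congr 1
  have hout := outA_fold (ps.foldl (fun mi p => (PySem.List.enumerate p).foldl stepA mi)
      (List.replicate n (0 : Int))) p 0 []
  rw [Nat.cast_zero] at hout
  rw [hout]
  simp only [List.nil_append, hn p hp, Nat.zero_add]
  congr 1
  apply List.map_congr_left
  intro t ht
  rw [List.mem_range] at ht
  rw [hrows.2 t ht]
  congr 1
  unfold colMaxF
  congr 1
  simp

-- zip(*ps) is the transpose when all rows have length n
theorem pyZipStar_eq (n : Nat) : ∀ (ps : List (List (String × String))), ps ≠ [] →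
    (∀ p ∈ ps, p.length = n) →
    pyZipStar ps = (List.range n).map (fun i => ps.map (fun p => p.getD i pvD)) := by
  induction n with
  | zero =>
    intro ps hne hn
    unfold pyZipStar
    have hc : ¬ (ps ≠ [] ∧ ps.all (fun p => p ≠ []) = true) := by
      rintro ⟨-, hall⟩
      obtain ⟨q, qs, rfl⟩ := List.exists_cons_of_ne_nil hne
      have hq := hn q (by simp)
      have hx := List.all_eq_true.mp hall q (by simp)
      simp only [decide_eq_true_eq] at hx
      exact hx (List.eq_nil_of_length_eq_zero hq)
    rw [dif_neg hc]
    simp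
  | succ n ih =>
    intro ps hne hn
    have hall : ps.all (fun p => p ≠ []) = true := by
      rw [List.all_eq_true]
      intro p hp
      have hl := hn p hp
      simp only [decide_eq_true_eq]
      intro h
      subst h
      simp at hl
    unfold pyZipStar
    rw [dif_pos ⟨hne, hall⟩]
    have htne : ps.map List.tail ≠ [] := by simpa using hne
    have htn : ∀ q ∈ ps.map List.tail, q.length = n := by
      intro q hq
      obtain ⟨p, hp, rfl⟩ := List.mem_map.mp hq
      have hl := hn p hp
      cases p with
      | nil => simp at hl
      | cons a as => simp at hl ⊢; omega
    rw [ih _ htne htn, List.range_succ_eq_map]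
    simp only [List.map_cons, List.map_map]
    congr 1
    · apply List.map_congr_left
      intro p hp
      have hl := hn p hp
      cases p with
      | nil => simp at hl
      | cons a as => rfl
    · apply List.map_congr_left
      intro i _
      apply List.map_congr_left
      intro p hp
      have hl := hn p hp
      cases p with
      | nil => simp at hl
      | cons a as => rfl

-- B's buffer fold, pointwise
theorem bufsB_getD (cols : List (List (String × String))) :
    ∀ (bufs : List (List String)), (∀ col ∈ cols, col.length = bufs.length) →
    ((cols.foldl (fun bufs col =>
        let m := col.foldl (fun m pr => max m (PySem.Str.len pr.2)) (0 : Int)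
        (bufs.zip col).map (fun bc => bc.1 ++ [cellB m bc.2])) bufs).length = bufs.length) ∧
    ∀ j : Nat, j < bufs.length →
      (cols.foldl (fun bufs col =>
        let m := col.foldl (fun m pr => max m (PySem.Str.len pr.2)) (0 : Int)
        (bufs.zip col).map (fun bc => bc.1 ++ [cellB m bc.2])) bufs).getD j [] =
      bufs.getD j [] ++ cols.map (fun col =>
        cellB (col.foldl (fun m pr => max m (PySem.Str.len pr.2)) 0) (col.getD j pvD)) := by
  induction cols with
  | nil => intro bufs _; exact ⟨rfl, fun j _ => by simp⟩
  | cons col cols ih =>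
    intro bufs hc
    have hcl : col.length = bufs.length := hc col (by simp)
    have hstep_len :
        ((bufs.zip col).map (fun bc =>
          bc.1 ++ [cellB (col.foldl (fun m pr => max m (PySem.Str.len pr.2)) 0) bc.2])).length
          = bufs.length := by
      simp [List.length_zip, hcl]
    have hrec := ih ((bufs.zip col).map (fun bc =>
        bc.1 ++ [cellB (col.foldl (fun m pr => max m (PySem.Str.len pr.2)) 0) bc.2]))
      (by intro c hcm; rw [hstep_len]; exact hc c (by simp [hcm]))
    simp only [List.foldl_cons]
    refine ⟨by rw [hrec.1, hstep_len], fun j hj => ?_⟩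
    rw [hrec.2 j (by rw [hstep_len]; exact hj)]
    have hjc : j < col.length := by omega
    have hjz : j < (bufs.zip col).length := by simp [List.length_zip]; omega
    have hstep_getD :
        ((bufs.zip col).map (fun bc =>
          bc.1 ++ [cellB (col.foldl (fun m pr => max m (PySem.Str.len pr.2)) 0) bc.2])).getD j []
        = bufs.getD j [] ++
          [cellB (col.foldl (fun m pr => max m (PySem.Str.len pr.2)) 0) (col.getD j pvD)] := by
      rw [List.getD_eq_getElem _ _ (by rw [hstep_len]; exact hj), List.getElem_map,
        List.getElem_zip, List.getD_eq_getElem _ _ hj, List.getD_eq_getElem _ _ hjc]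
    rw [hstep_getD]
    simp

-- "".join over cells is the flattened character list
theorem chars_join_nil (xs : List (List Char)) : PySem.Chars.join [] xs = xs.flatten := by
  induction xs with
  | nil => simp [PySem.Chars.join_nil]
  | cons a rest ih =>
    cases rest with
    | nil => simp [PySem.Chars.join_singleton]
    | cons b r =>
      rw [PySem.Chars.join_cons_cons, ih]
      simp

theorem join_cells (l : List String) :
    PySem.Str.join "" l = String.ofList (l.map String.toList).flatten := by
  rw [← String.ofList_toList (s := PySem.Str.join "" l), PySem.Str.toList_join]
  simp [chars_join_nil]

theorem toList_cellB (m : Int) (pr : String × String) : (cellB m pr).toList = cellC m pr := by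
  simp [cellB, cellC, PySem.List.pyRepeat_singleton]

-- canonical form of B under the precondition
theorem expandB_canon (ps : List (List (String × String))) (n : Nat)
    (hne : ps ≠ []) (hn : ∀ p ∈ ps, p.length = n) :
    expand_sequences_alt ps =
      ps.map (fun p => String.ofList
        (((List.range n).map (fun i => cellC (colMaxF ps i) (p.getD i pvD))).flatten)) := by
  simp only [expand_sequences_alt]
  rw [pyZipStar_eq n ps hne hn]
  have hc : ∀ col ∈ (List.range n).map (fun i => ps.map (fun p => p.getD i pvD)),
      col.length = (ps.map (fun _ => ([] : List String))).length := by
    intro col hcm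
    obtain ⟨i, _, rfl⟩ := List.mem_map.mp hcm
    simp
  have hb := bufsB_getD ((List.range n).map (fun i => ps.map (fun p => p.getD i pvD)))
    (ps.map (fun _ => ([] : List String))) hc
  apply List.ext_getElem
  · rw [List.length_map, hb.1]
    simp
  · intro j h1 h2
    rw [List.length_map, hb.1, List.length_map] at h1
    rw [List.getElem_map, List.getElem_map]
    rw [← List.getD_eq_getElem _ ([] : List String) (by rw [hb.1]; simpa using h1)]
    rw [hb.2 j (by simpa using h1)]
    have hb0 : (ps.map (fun _ => ([] : List String))).getD j [] = [] := by
      rw [List.getD_eq_getElem _ _ (by simpa using h1), List.getElem_map]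
    rw [hb0, List.nil_append, List.map_map, join_cells, List.map_map]
    congr 1
    congr 1
    apply List.map_congr_left
    intro i _
    simp only [Function.comp]
    rw [toList_cellB]
    congr 1
    · unfold colMaxF
      rw [List.foldl_map]
    · rw [List.getD_eq_getElem _ _ (by simpa using h1), List.getElem_map]

-- ===== VERDICT (by name: the statement is the Claim_ definition above) =====
theorem expand_sequences_spec : Claim_equal_expand_sequences := by
  intro ps _hdom hpre
  obtain ⟨hne, hlen⟩ := hpre
  unfold Spec_expand_sequences
  have hhead : ((ps.map List.length).headD 0) = (ps.headD []).length := by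
    cases ps with
    | nil => simp
    | cons p rest => simp
  rw [expandA_canon ps (ps.headD []).length hlen hhead,
      expandB_canon ps (ps.headD []).length hne hlen]
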